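-- pv_equiv track=rewrite | github.com/Roonil03/HackerEarthPractice | DataStructures/HiddenTreasure/hiddenTreasure.py | solve
-- ===== SOURCE A (Python) =====
-- def solve (n, nums):
--     # Write your code here
--     digit_sum_freq = {}
--     def get_digit_sum(num):
--         total = 0
--         while num > 0:
--             total += num % 10
--             num //= 10
--         return total
--     for num in nums:
--         ds = get_digit_sum(num)
--         digit_sum_freq[ds] = digit_sum_freq.get(ds, 0) + 1
--     pairs = 0
--     for freq in digit_sum_freq.values():
--         if freq > 1:
--             pairs += freq * (freq - 1) // 2
--     return pairs
-- ===== SOURCE B (Python) =====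
-- def solve(n, nums):
--     # Same digit-sum helper; counting folded into one scan (no values() pass, no formula)
--     def get_digit_sum(num):
--         total = 0
--         while num > 0:
--             total += num % 10
--             num //= 10
--         return total
--     seen = {}
--     pairs = 0
--     for num in nums:
--         ds = get_digit_sum(num)
--         c = seen.get(ds, 0)
--         pairs += c
--         seen[ds] = c + 1
--     return pairs
-- ===== Notes on version B (the rewrite author's own statement) =====
-- stated objective: alternative
-- what changed: B counts pairs incrementally in a single scan (pairs += numbers-seen-so-far with the same digit sum), eliminating A's second loop over the frequency dict and the f*(f-1)//2 closed-form entirely.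
import Mathlib
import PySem

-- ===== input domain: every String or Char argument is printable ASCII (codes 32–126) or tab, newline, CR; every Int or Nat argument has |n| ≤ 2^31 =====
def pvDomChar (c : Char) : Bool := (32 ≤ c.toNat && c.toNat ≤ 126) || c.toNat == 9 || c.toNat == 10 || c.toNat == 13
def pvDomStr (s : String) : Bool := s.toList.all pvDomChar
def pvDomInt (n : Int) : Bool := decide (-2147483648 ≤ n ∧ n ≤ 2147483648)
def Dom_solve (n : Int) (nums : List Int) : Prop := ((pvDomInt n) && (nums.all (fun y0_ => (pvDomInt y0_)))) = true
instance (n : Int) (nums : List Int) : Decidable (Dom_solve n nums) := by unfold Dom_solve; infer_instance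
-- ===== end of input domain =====

-- B changes: pair counting folded into the single scan (no second loop over values, no f*(f-1)//2 formula); objective: alternative decomposition.

-- ===== PORT A =====
-- shared helper: both Pythons contain the identical `get_digit_sum` (while num > 0: total += num % 10; num //= 10)
def getDigitSum (num : Int) : Int :=
  if h : num > 0 then
    PySem.Int.mod num 10 + getDigitSum (PySem.Int.floordiv num 10)
  else 0
termination_by num.toNat
decreasing_by
  rw [PySem.Int.floordiv_eq_ediv_of_pos (by norm_num)]
  omega

def solve (n : Int) (nums : List Int) : Int :=
  let digit_sum_freq : PySem.Dict Int Int :=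
    nums.foldl (fun d num =>
      let ds := getDigitSum num
      d.insert ds (d.getD ds 0 + 1)) PySem.Dict.empty
  digit_sum_freq.values.foldl (fun pairs freq =>
    if freq > 1 then pairs + PySem.Int.floordiv (freq * (freq - 1)) 2 else pairs) 0

-- ===== PORT B =====
def solve_alt (n : Int) (nums : List Int) : Int :=
  (nums.foldl (fun (st : PySem.Dict Int Int × Int) num =>
      let ds := getDigitSum num
      let c := st.1.getD ds 0
      (st.1.insert ds (c + 1), st.2 + c)) (PySem.Dict.empty, 0)).2

-- ===== PRECONDITION & SPEC =====
def Spec_solve (n : Int) (nums : List Int) (out : Int) : Prop := out = solve_alt n nums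
instance (n : Int) (nums : List Int) (out : Int) : Decidable (Spec_solve n nums out) := by unfold Spec_solve; infer_instance

-- ===== CLAIM (what is proved, stated in full; the proofs are below) =====
def Claim_equal_solve : Prop := ∀ (n : Int) (nums : List Int), Dom_solve n nums → Spec_solve n nums (solve n nums)

-- ===== LEMMAS AND PROOFS =====

-- the contribution of one frequency value in A's second loop
def gA (f : Int) : Int := if f > 1 then PySem.Int.floordiv (f * (f - 1)) 2 else 0

-- A's final value over the multiset of digit sums s
def T (s : List Int) : Int := ((PySem.Set.ofList s).map (fun k => gA (s.count k : Int))).sum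

theorem gA_succ (c : Nat) : gA ((c : Int) + 1) = gA (c : Int) + c := by
  unfold gA
  rw [PySem.Int.floordiv_eq_ediv_of_pos (by norm_num), PySem.Int.floordiv_eq_ediv_of_pos (by norm_num)]
  have key : ((c : Int) + 1) * ((c : Int) + 1 - 1) / 2 = (c : Int) * ((c : Int) - 1) / 2 + c := by
    rw [show ((c : Int) + 1) * ((c : Int) + 1 - 1) = (c : Int) * ((c : Int) - 1) + (c : Int) * 2 from by ring,
      Int.add_mul_ediv_right _ _ (by norm_num)]
  split_ifs with h1 h2 h2
  · exact key
  · have hc1 : (c : Int) = 1 := by omega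
    rw [key, hc1]; norm_num
  · omega
  · have hc0 : (c : Int) = 0 := by omega
    rw [hc0]; norm_num

theorem sum_map_update {g g' : Int → Int} {x : Int} {d : Int}
    (hx : g' x = g x + d) (hne : ∀ k, k ≠ x → g' k = g k) :
    ∀ (K : List Int), K.Nodup → x ∈ K → (K.map g').sum = (K.map g).sum + d := by
  intro K
  induction K with
  | nil => intro _ hm; cases hm
  | cons k K ih =>
    intro hnd hm
    simp only [List.map_cons, List.sum_cons]
    rcases List.mem_cons.mp hm with rfl | hmK
    · have hxK : x ∉ K := (List.nodup_cons.mp hnd).1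
      have : K.map g' = K.map g := List.map_congr_left (fun a ha => hne a (fun h => hxK (h ▸ ha)))
      rw [hx, this]; ring
    · have hk : k ≠ x := fun h => ((List.nodup_cons.mp hnd).1 (h ▸ hmK))
      rw [hne k hk, ih (List.nodup_cons.mp hnd).2 hmK]; ring

theorem ofList_append_singleton (s : List Int) (x : Int) :
    PySem.Set.ofList (s ++ [x]) = PySem.Set.add (PySem.Set.ofList s) x := by
  rw [PySem.Set.ofList_eq_foldl, PySem.Set.ofList_eq_foldl, List.foldl_append]
  rfl

theorem T_append (s : List Int) (x : Int) : T (s ++ [x]) = T s + (s.count x : Int) := by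
  unfold T
  rw [ofList_append_singleton]
  have hcount : ∀ k, ((s ++ [x]).count k : Int)
      = (if k = x then (s.count k : Int) + 1 else (s.count k : Int)) := by
    intro k
    rw [List.count_append]
    by_cases h : k = x
    · simp [h]
    · simp [h, Ne.symm h]
  by_cases hx : x ∈ PySem.Set.ofList s
  · have hadd : PySem.Set.add (PySem.Set.ofList s) x = PySem.Set.ofList s := by
      simp [PySem.Set.add, hx]
    rw [hadd]
    refine sum_map_update ?_ ?_ (PySem.Set.ofList s) (PySem.Set.nodup_ofList s) hx
    · rw [hcount x]; simp [gA_succ]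
    · intro k hk; rw [hcount k]; simp [hk]
  · have hxs : x ∉ s := fun h => hx ((PySem.Set.mem_ofList s x).mpr h)
    have hadd : PySem.Set.add (PySem.Set.ofList s) x = PySem.Set.ofList s ++ [x] := by
      simp [PySem.Set.add, hx]
    rw [hadd, List.map_append, List.sum_append]
    have h1 : (PySem.Set.ofList s).map (fun k => gA ((s ++ [x]).count k : Int))
        = (PySem.Set.ofList s).map (fun k => gA (s.count k : Int)) := by
      refine List.map_congr_left (fun a ha => ?_)
      have : a ≠ x := fun h => hx (h ▸ ha)
      rw [hcount a]; simp [this]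
    have h2 : s.count x = 0 := List.count_eq_zero.mpr hxs
    rw [h1]
    simp [h2, gA]

-- B's fold maintains (counter of digit sums seen, T of digit sums seen)
theorem foldB_eq (nums : List Int) :
    nums.foldl (fun (st : PySem.Dict Int Int × Int) num =>
      let ds := getDigitSum num
      let c := st.1.getD ds 0
      (st.1.insert ds (c + 1), st.2 + c)) (PySem.Dict.empty, 0)
    = (PySem.Dict.counter (nums.map getDigitSum), T (nums.map getDigitSum)) := by
  induction nums using List.reverseRecOn with
  | nil => rfl
  | append_singleton l x ih =>
    rw [List.foldl_append, ih]
    simp only [List.foldl_cons, List.foldl_nil, List.map_append, List.map_cons, List.map_nil]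
    have hc : (PySem.Dict.counter (l.map getDigitSum)).insert (getDigitSum x)
        ((PySem.Dict.counter (l.map getDigitSum)).getD (getDigitSum x) 0 + 1)
        = PySem.Dict.counter (l.map getDigitSum ++ [getDigitSum x]) := by
      rw [← PySem.Dict.foldl_insert_getD_add_one_eq_counter,
        ← PySem.Dict.foldl_insert_getD_add_one_eq_counter, List.foldl_append]
      rfl
    rw [T_append, hc, PySem.Dict.getD_counter]

-- A's second loop is a sum of gA over the values
theorem foldA_sum (l : List Int) : ∀ p : Int,
    l.foldl (fun pairs freq =>
      if freq > 1 then pairs + PySem.Int.floordiv (freq * (freq - 1)) 2 else pairs) p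
    = p + (l.map gA).sum := by
  induction l with
  | nil => intro p; simp
  | cons f l ih =>
    intro p
    simp only [List.foldl_cons, List.map_cons, List.sum_cons]
    by_cases h : f > 1
    · rw [ih]; simp [gA, h]; ring
    · rw [if_neg h, ih]; simp [gA, h]

theorem solve_eq_T (n : Int) (nums : List Int) : solve n nums = T (nums.map getDigitSum) := by
  unfold solve
  simp only
  rw [show (nums.foldl (fun d num =>
      let ds := getDigitSum num
      d.insert ds (d.getD ds 0 + 1)) PySem.Dict.empty)
      = PySem.Dict.counter (nums.map getDigitSum) from by
    rw [← PySem.Dict.foldl_insert_getD_add_one_eq_counter, List.foldl_map]]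
  rw [foldA_sum]
  unfold T
  have : (PySem.Dict.counter (nums.map getDigitSum)).values
      = (PySem.Set.ofList (nums.map getDigitSum)).map (fun k => ((nums.map getDigitSum).count k : Int)) := by
    show ((PySem.Dict.counter (nums.map getDigitSum)).items).map (·.2) = _
    rw [PySem.Dict.items_counter]
    simp
  rw [this, List.map_map]
  simp [Function.comp_def]

-- ===== VERDICT (by name: the statement is the Claim_ definition above) =====
theorem solve_spec : Claim_equal_solve := by
  intro n nums _
  unfold Spec_solve solve_alt
  rw [foldB_eq, solve_eq_T]
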